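-- pv_equiv track=rewrite | github.com/omar140202/ModelosProgramacionII | ejercicios muerte subita/superpares.py | superpares
-- ===== SOURCE A (Python) =====
-- def superpares(num):
--     if num==0:
--         return True
--     else:
--         if(num%2==0):
--             return True and superpares(int(num/10))
--         else:
--             return False
-- ===== SOURCE B (Python) =====
-- def superpares(num):
--     n = abs(num)
--     while n:
--         if n % 2:
--             return False
--         n //= 10
--     return True
-- ===== Notes on version B (the rewrite author's own statement) =====
-- stated objective: simpler
-- what changed: Replaces signed tail recursion with float-division truncation by an iterative while loop over abs(num) using integer //, with an early return on the first odd digit.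
import Mathlib
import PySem

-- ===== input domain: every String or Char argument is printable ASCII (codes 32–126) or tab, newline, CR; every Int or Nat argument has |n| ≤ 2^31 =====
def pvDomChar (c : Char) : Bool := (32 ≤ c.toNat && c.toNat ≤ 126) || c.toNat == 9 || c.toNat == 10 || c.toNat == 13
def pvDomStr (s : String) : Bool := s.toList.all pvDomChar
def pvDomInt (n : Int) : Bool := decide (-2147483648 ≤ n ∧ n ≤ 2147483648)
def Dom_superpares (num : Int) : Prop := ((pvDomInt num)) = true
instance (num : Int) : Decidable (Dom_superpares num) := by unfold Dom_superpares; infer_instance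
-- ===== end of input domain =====

-- B: iterative loop over abs(num) with integer // instead of A's signed recursion via int(num/10); objective: simpler.
-- Port of A: int(num/10) is truncating division toward zero (exact on Dom), ported as Int.tdiv.
-- ===== PORT A =====
def superpares (num : Int) : Bool :=
  if num = 0 then true
  else if PySem.Int.mod num 2 = 0 then true && superpares (num.tdiv 10)
  else false
termination_by num.natAbs
decreasing_by
  have h10 : (num.tdiv 10).natAbs = num.natAbs / 10 := by
    rw [Int.natAbs_tdiv]; rfl
  have h0 : num.natAbs ≠ 0 := by simpa using ‹num ≠ 0›
  omega

-- ===== PORT B =====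
def superparesLoop (n : Nat) : Bool :=
  if n = 0 then true
  else if n % 2 ≠ 0 then false
  else superparesLoop (n / 10)

def superpares_alt (num : Int) : Bool := superparesLoop num.natAbs

-- ===== PRECONDITION & SPEC =====
def Spec_superpares (num : Int) (out : Bool) : Prop := out = superpares_alt num
instance (num : Int) (out : Bool) : Decidable (Spec_superpares num out) := by unfold Spec_superpares; infer_instance

-- ===== CLAIM (what is proved, stated in full; the proofs are below) =====
def Claim_equal_superpares : Prop := ∀ (num : Int), Dom_superpares num → Spec_superpares num (superpares num)

-- ===== LEMMAS AND PROOFS =====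

-- ===== VERDICT (by name: the statement is the Claim_ definition above) =====
theorem agree (k : Nat) : ∀ (num : Int), num.natAbs ≤ k → superpares num = superparesLoop num.natAbs := by
  induction k using Nat.strong_induction_on with
  | _ k ih =>
    intro num hle
    by_cases h0 : num = 0
    · subst h0; simp [superpares, superparesLoop]
    · have h0n : num.natAbs ≠ 0 := by simpa using h0
      have h10 : (num.tdiv 10).natAbs = num.natAbs / 10 := by
        rw [Int.natAbs_tdiv]; rfl
      have hlt : num.natAbs / 10 < k :=
        lt_of_lt_of_le (Nat.div_lt_self (Nat.pos_of_ne_zero h0n) (by norm_num)) hle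
      have hmod : PySem.Int.mod num 2 = num % 2 :=
        PySem.Int.mod_eq_emod_of_pos (by norm_num)
      by_cases hm : PySem.Int.mod num 2 = 0
      · have hme : num.natAbs % 2 = 0 := by
          rw [hmod] at hm; omega
        have hrec := ih (num.natAbs / 10) hlt (num.tdiv 10) (le_of_eq h10)
        have hd : (2:Int) ∣ num := by rw [hmod] at hm; omega
        rw [superpares.eq_1, superparesLoop.eq_1]
        simp [h0, h0n, hd, hme, hrec, h10]
      · have hme : ¬ num.natAbs % 2 = 0 := by
          rw [hmod] at hm; omega
        have hd : ¬ (2:Int) ∣ num := by rw [hmod] at hm; omega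
        rw [superpares.eq_1, superparesLoop.eq_1]
        simp [h0, h0n, hd, hme]

theorem superpares_spec : Claim_equal_superpares := by
  intro num _
  unfold Spec_superpares superpares_alt
  exact agree num.natAbs num le_rfl
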